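-- pv_equiv track=rewrite | github.com/gitarja/TableTennis | Utils/DataReader.py | augmentHeader
-- ===== SOURCE A (Python) =====
-- def augmentHeader(header1: list, header2: list):
--     header1_c = []
--     v = ""
--     for h in header1:
--         if h != "":
--             v = h
--         header1_c.append(v)
--
--     a = ["_".join(x) for x in zip(header1_c, header2)]
--
--     return a
-- ===== SOURCE B (Python) =====
-- def augmentHeader(header1: list, header2: list):
--     # Segment decomposition: the positions of non-empty header1 entries split
--     # the zipped prefix into blocks on which the fill value is constant; emit
--     # each block wholesale instead of forward-filling element by element.
--     n = min(len(header1), len(header2))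
--     marks = [i for i in range(n) if header1[i] != ""]
--     out = []
--     for s, (e, v) in zip([0] + marks, zip(marks + [n], [""] + [header1[i] for i in marks])):
--         for i in range(s, e):
--             out.append(v + "_" + header2[i])
--     return out
-- ===== Notes on version B (the rewrite author's own statement) =====
-- stated objective: alternative
-- what changed: Replaces the stateful element-by-element forward-fill plus zip/join with a segment decomposition: the indices of non-empty header1 entries are collected once, they split the zipped prefix into blocks of constant fill value, and each block is emitted wholesale.
import Mathlib
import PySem

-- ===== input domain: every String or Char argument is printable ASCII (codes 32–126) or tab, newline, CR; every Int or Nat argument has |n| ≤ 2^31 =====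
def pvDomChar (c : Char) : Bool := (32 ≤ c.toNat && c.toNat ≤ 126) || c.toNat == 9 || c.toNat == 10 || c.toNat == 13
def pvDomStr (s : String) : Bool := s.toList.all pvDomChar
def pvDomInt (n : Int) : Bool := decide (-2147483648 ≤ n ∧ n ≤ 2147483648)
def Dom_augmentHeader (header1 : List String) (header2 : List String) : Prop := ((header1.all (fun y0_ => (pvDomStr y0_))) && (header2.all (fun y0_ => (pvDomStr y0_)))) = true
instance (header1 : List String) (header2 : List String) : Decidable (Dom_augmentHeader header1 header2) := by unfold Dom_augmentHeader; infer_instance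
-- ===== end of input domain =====

-- B replaces A's element-by-element forward-fill with a segment decomposition (non-empty positions split the zipped prefix into constant-value blocks); objective: alternative, same cost.


-- ===== PORT A =====
-- the for-loop building header1_c: carries the running value v, appends it after the update
def augmentFill (v : String) : List String → List String
  | [] => []
  | h :: t => let v' := if h ≠ "" then h else v; v' :: augmentFill v' t

def augmentHeader (header1 : List String) (header2 : List String) : List String :=
  let header1_c := augmentFill "" header1
  (header1_c.zip header2).map (fun x => PySem.Str.join "_" [x.1, x.2])

-- ===== PORT B =====
-- n = min(len, len); marks = [i for i in range(n) if header1[i] != ""] (indices i < n are valid, so getD is exact);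
-- the loop over zip([0]+marks, zip(marks+[n], [""]+vals)) becomes a foldl; Python's range(s, e) (0 ≤ s ≤ e here)
-- is List.range' s (e - s)
def augmentHeader_alt (header1 : List String) (header2 : List String) : List String :=
  let n := min header1.length header2.length
  let marks := (List.range n).filter (fun i => header1.getD i "" ≠ "")
  ((0 :: marks).zip ((marks ++ [n]).zip ("" :: marks.map (fun i => header1.getD i "")))).foldl
    (fun out p => out ++ (List.range' p.1 (p.2.1 - p.1)).map
      (fun i => p.2.2 ++ "_" ++ header2.getD i "")) []

-- ===== PRECONDITION & SPEC =====
def Spec_augmentHeader (header1 : List String) (header2 : List String) (out : List String) : Prop := out = augmentHeader_alt header1 header2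
instance (header1 : List String) (header2 : List String) (out : List String) : Decidable (Spec_augmentHeader header1 header2 out) := by unfold Spec_augmentHeader; infer_instance

-- ===== CLAIM (what is proved, stated in full; the proofs are below) =====
def Claim_equal_augmentHeader : Prop := ∀ (header1 : List String) (header2 : List String), Dom_augmentHeader header1 header2 → Spec_augmentHeader header1 header2 (augmentHeader header1 header2)

-- ===== LEMMAS AND PROOFS =====
theorem join_pair (a b : String) : PySem.Str.join "_" [a, b] = a ++ "_" ++ b := by
  apply String.toList_injective
  simp [PySem.Str.join, PySem.Chars.join, List.intercalate]

-- fillAt h1 i = the forward-filled value at index i (A's header1_c[i])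
def backFind (v : String) : List String → String
  | [] => v
  | h :: t => if h ≠ "" then h else backFind v t

def fillAt (h1 : List String) (i : Nat) : String := backFind "" ((h1.take (i + 1)).reverse)

theorem augmentFill_length (v : String) (l : List String) : (augmentFill v l).length = l.length := by
  induction l generalizing v with
  | nil => rfl
  | cons h t ih => simp [augmentFill, ih]

theorem backFind_append (v h : String) (xs : List String) :
    backFind v (xs ++ [h]) = backFind (if h ≠ "" then h else v) xs := by
  induction xs with
  | nil => simp [backFind]
  | cons a t ih => by_cases ha : a ≠ "" <;> simp [backFind, ha, ih]

theorem augmentFill_getElem (v : String) (l : List String) (i : Nat) (hi : i < l.length) :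
    (augmentFill v l)[i]'(by rw [augmentFill_length]; exact hi) =
      backFind v ((l.take (i + 1)).reverse) := by
  induction l generalizing v i with
  | nil => simp at hi
  | cons h t ih =>
      cases i with
      | zero => simp [augmentFill, backFind]
      | succ j =>
          have hj : j < t.length := by simpa using hi
          simp only [augmentFill, List.getElem_cons_succ]
          rw [ih _ j hj]
          simp [backFind_append]

-- A's result, as a map over the index range
theorem augmentHeader_eq_map (h1 h2 : List String) :
    augmentHeader h1 h2 = (List.range (min h1.length h2.length)).map
      (fun i => fillAt h1 i ++ "_" ++ h2.getD i "") := by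
  unfold augmentHeader
  apply List.ext_getElem
  · simp [augmentFill_length]
  · intro i hA hB
    simp only [List.getElem_map, List.getElem_zip, List.getElem_range]
    have hi1 : i < h1.length := by simp [augmentFill_length] at hA; omega
    have hi2 : i < h2.length := by simp [augmentFill_length] at hA; omega
    rw [join_pair, augmentFill_getElem "" h1 i hi1, List.getD_eq_getElem h2 "" hi2, fillAt]

theorem fillAt_succ (h1 : List String) (i : Nat) (h : i + 1 < h1.length) :
    fillAt h1 (i + 1) = if h1.getD (i + 1) "" ≠ "" then h1.getD (i + 1) "" else fillAt h1 i := by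
  have hx : (h1.take (i + 1 + 1)).reverse = h1[i + 1] :: (h1.take (i + 1)).reverse := by
    rw [List.take_add_one, List.getElem?_eq_getElem h]
    simp
  unfold fillAt
  rw [hx, List.getD_eq_getElem h1 "" h]
  by_cases hc : h1[i + 1] = "" <;> simp [backFind, hc]

theorem fillAt_zero (h1 : List String) (h : 0 < h1.length) :
    fillAt h1 0 = if h1.getD 0 "" ≠ "" then h1.getD 0 "" else "" := by
  cases h1 with
  | nil => simp at h
  | cons a t => simp [fillAt, backFind]

-- below the first mark everything is empty, so the fill value is ""
theorem fill_prefix_empty (h1 : List String) (n : Nat) (hn : n ≤ h1.length) :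
    ∀ i, i < n → (∀ j, j ≤ i → h1.getD j "" = "") → fillAt h1 i = "" := by
  intro i
  induction i with
  | zero =>
      intro hi hj
      rw [fillAt_zero h1 (by omega), hj 0 (Nat.le_refl 0)]
      simp
  | succ k ih =>
      intro hi hj
      rw [fillAt_succ h1 k (by omega), hj (k + 1) (Nat.le_refl _), if_neg (by simp)]
      exact ih (by omega) (fun j hji => hj j (by omega))

-- from a mark m onward, while every later position up to i is empty, the fill value is h1[m]
theorem fill_from_mark (h1 : List String) (n m : Nat) (hn : n ≤ h1.length) (hm : m < n)
    (hmark : h1.getD m "" ≠ "") :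
    ∀ i, m ≤ i → i < n → (∀ j, m < j → j ≤ i → h1.getD j "" = "") → fillAt h1 i = h1.getD m "" := by
  intro i hmi
  induction i, hmi using Nat.le_induction with
  | base =>
      intro _ _
      cases m with
      | zero => rw [fillAt_zero h1 (by omega), if_pos hmark]
      | succ k => rw [fillAt_succ h1 k (by omega), if_pos hmark]
  | succ i hmi ih =>
      intro hin hj
      rw [fillAt_succ h1 i (by omega), hj (i + 1) (by omega) (Nat.le_refl _), if_neg (by simp)]
      exact ih (by omega) (fun j hmj hji => hj j hmj (by omega))

-- the segment fold equals the index-range map, by induction on the list of marks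
theorem segs_eq (h1 h2 : List String) (n : Nat) (hn : n ≤ h1.length) :
    ∀ (ms : List Nat) (s : Nat) (v : String),
      (∀ m ∈ ms, s ≤ m ∧ m < n) →
      List.Pairwise (· < ·) ms →
      (∀ m ∈ ms, h1.getD m "" ≠ "") →
      (∀ i, s < i → i < n → i ∉ ms → h1.getD i "" = "") →
      (∀ i, s ≤ i → i < n → (∀ m ∈ ms, i < m) → fillAt h1 i = v) →
      ((s :: ms).zip ((ms ++ [n]).zip (v :: ms.map (fun i => h1.getD i "")))).flatMap
        (fun p => (List.range' p.1 (p.2.1 - p.1)).map (fun i => p.2.2 ++ "_" ++ h2.getD i ""))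
      = (List.range' s (n - s)).map (fun i => fillAt h1 i ++ "_" ++ h2.getD i "") := by
  intro ms
  induction ms with
  | nil =>
      intro s v _ _ _ _ h5
      simp only [List.zip_cons_cons, List.nil_append, List.map_nil, List.zip_nil_left,
        List.flatMap_cons, List.flatMap_nil, List.append_nil, List.zip_nil_right]
      apply List.map_congr_left
      intro i hi
      rw [List.mem_range'] at hi
      rw [h5 i (by omega) (by omega) (by simp)]
  | cons m ms ih =>
      intro s v h2' hpw h6 h4 h5
      have hsm : s ≤ m := (h2' m (by simp)).1
      have hmn : m < n := (h2' m (by simp)).2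
      have hlt : ∀ x ∈ ms, m < x := fun x hx => (List.pairwise_cons.mp hpw).1 x hx
      simp only [List.zip_cons_cons, List.cons_append, List.map_cons, List.flatMap_cons]
      rw [ih m (h1.getD m "")
        (fun x hx => ⟨le_of_lt (hlt x hx), (h2' x (by simp [hx])).2⟩)
        (List.pairwise_cons.mp hpw).2
        (fun x hx => h6 x (by simp [hx]))
        (fun i hmi hin hnot => h4 i (by omega) hin
          (by simp only [List.mem_cons, not_or]; exact ⟨by omega, hnot⟩))
        (fun i hmi hin hbelow =>
          fill_from_mark h1 n m hn hmn (h6 m (by simp)) i hmi hin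
            (fun j hmj hji => h4 j (by omega) (by omega)
              (by simp only [List.mem_cons, not_or]
                  exact ⟨by omega, fun hj => absurd (hbelow j hj) (by omega)⟩)))]
      have hsplit : List.range' s (n - s) = List.range' s (m - s) ++ List.range' m (n - m) := by
        have h := @List.range'_append s (m - s) (n - m) 1
        rw [show s + 1 * (m - s) = m by omega] at h
        rw [show n - s = (m - s) + (n - m) by omega, ← h]
      rw [hsplit, List.map_append]
      congr 1
      apply List.map_congr_left
      intro i hi
      rw [List.mem_range'] at hi
      rw [h5 i (by omega) (by omega)
        (fun x hx => by
          rcases List.mem_cons.mp hx with h | h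
          · omega
          · exact lt_trans (by omega) (hlt x h))]

theorem foldl_append_chunks {α β : Type} (f : α → List β) (l : List α) (acc : List β) :
    l.foldl (fun out p => out ++ f p) acc = acc ++ l.flatMap f := by
  induction l generalizing acc with
  | nil => simp
  | cons a t ih => simp [ih, List.flatMap_cons]

-- ===== VERDICT (by name: the statement is the Claim_ definition above) =====
theorem augmentHeader_spec : Claim_equal_augmentHeader := by
  intro h1 h2 _
  unfold Spec_augmentHeader augmentHeader_alt
  rw [augmentHeader_eq_map]
  simp only []
  rw [foldl_append_chunks, List.nil_append]
  rw [segs_eq h1 h2 (min h1.length h2.length) (by omega)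
      ((List.range (min h1.length h2.length)).filter (fun i => h1.getD i "" ≠ "")) 0 ""
      (fun m hm => by
        rw [List.mem_filter, List.mem_range] at hm
        exact ⟨Nat.zero_le _, hm.1⟩)
      (List.Pairwise.sublist List.filter_sublist List.pairwise_lt_range)
      (fun m hm => by
        rw [List.mem_filter] at hm
        simpa using hm.2)
      (fun i _ hin hnot => by
        by_contra hne
        exact hnot (by rw [List.mem_filter, List.mem_range]; exact ⟨hin, by simpa using hne⟩))
      (fun i _ hin hbelow => by
        apply fill_prefix_empty h1 _ (by omega) i hin
        intro j hji
        by_contra hne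
        have hj : j ∈ (List.range (min h1.length h2.length)).filter (fun i => h1.getD i "" ≠ "") := by
          rw [List.mem_filter, List.mem_range]
          exact ⟨by omega, by simpa using hne⟩
        exact absurd (hbelow j hj) (by omega))]
  rw [List.range_eq_range']
  simp
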